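-- pv_equiv track=rewrite | github.com/AlifSrSE/ProblemSolves | 1999D-slavic'sExam.py | solve
-- ===== SOURCE A (Python) =====
-- def solve(s, t):
--     letters = list(s)
--     index = 0
--     for c in t:
--         while index != len(letters) and (letters[index] != '?' and letters[index] != c):
--             index += 1
--
--         if index == len(letters):
--             return "NO"
--
--         if letters[index] == '?':
--             letters[index] = c
--
--         index += 1
--
--     for i in range(index, len(letters)):
--         if letters[i] == '?':
--             letters[i] = 'a'
--
--     return "YES\n" + "".join(letters)
-- ===== SOURCE B (Python) =====
-- def solve(s, t):
--     rest = s
--     parts = []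
--     for c in t:
--         k = next((i for i, ch in enumerate(rest) if ch == '?' or ch == c), -1)
--         if k < 0:
--             return "NO"
--         parts.append(rest[:k])
--         parts.append(c)
--         rest = rest[k + 1:]
--     return "YES\n" + "".join(parts) + rest.replace('?', 'a')
-- ===== Notes on version B (the rewrite author's own statement) =====
-- stated objective: alternative
-- what changed: Replaces A's in-place list mutation with a global index and a second fill pass by immutable segment splitting: for each char of t it finds the first usable position in the remaining suffix, emits the skipped segment plus that char, slices the suffix off, and finishes with a replace on the untouched tail.
import Mathlib
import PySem

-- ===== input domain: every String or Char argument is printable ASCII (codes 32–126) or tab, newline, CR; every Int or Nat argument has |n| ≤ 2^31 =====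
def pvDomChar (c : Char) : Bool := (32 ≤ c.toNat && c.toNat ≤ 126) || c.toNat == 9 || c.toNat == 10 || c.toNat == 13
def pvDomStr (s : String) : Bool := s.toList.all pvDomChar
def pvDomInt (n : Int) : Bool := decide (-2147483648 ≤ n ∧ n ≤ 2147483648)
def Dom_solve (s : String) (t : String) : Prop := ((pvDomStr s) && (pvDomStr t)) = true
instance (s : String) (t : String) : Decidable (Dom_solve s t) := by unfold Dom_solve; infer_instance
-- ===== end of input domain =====

-- B replaces A's in-place list mutation with a global index and a second fill pass by
-- immutable segment splitting over the remaining suffix of s (objective: alternative).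

-- ===== PORT A =====
-- the inner `while index != len(letters) and (letters[index] != '?' and letters[index] != c)`;
-- Python's first test is `index != len(letters)`: index starts at 0 and steps up by 1,
-- so it never exceeds the length and `<` is the same test (written `<` so termination is evident)
def solveWhile (letters : List Char) (c : Char) (index : Nat) : Nat :=
  if index < letters.length ∧ (letters.getD index ' ' ≠ '?' ∧ letters.getD index ' ' ≠ c) then
    solveWhile letters c (index + 1)
  else index
termination_by letters.length - index
decreasing_by rename_i h; omega

-- the outer `for c in t` loop; `none` = the early `return "NO"`
def solveLoop (letters : List Char) (index : Nat) : List Char → Option (List Char × Nat)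
  | [] => some (letters, index)
  | c :: cs =>
    if solveWhile letters c index = letters.length then none
    else
      solveLoop
        (if letters.getD (solveWhile letters c index) ' ' = '?'
         then letters.set (solveWhile letters c index) c else letters)
        (solveWhile letters c index + 1) cs

-- the final `for i in range(index, len(letters))` fill loop
def solveFill (letters : List Char) (i : Nat) : List Char :=
  if i < letters.length then
    solveFill (if letters.getD i ' ' = '?' then letters.set i 'a' else letters) (i + 1)
  else letters
termination_by letters.length - i
decreasing_by split <;> (try simp only [List.length_set]) <;> omega

def solve (s : String) (t : String) : String :=
  match solveLoop s.toList 0 t.toList with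
  | none => "NO"
  | some (letters, index) => "YES\n" ++ String.ofList (solveFill letters index)

-- ===== PORT B =====
-- the `for c in t` loop over state (rest, parts);
-- `next((i for i, ch in enumerate(rest) if ch == '?' or ch == c), -1)` plus the `k < 0`
-- check is ported as List.findIdx? (none = the -1 default = the early `return "NO"`);
-- rest[:k] / rest[k+1:] are List.take / List.drop
def solveAltLoop (rest : List Char) (parts : List Char) : List Char → Option (List Char × List Char)
  | [] => some (parts, rest)
  | c :: cs =>
    match rest.findIdx? (fun ch => ch == '?' || ch == c) with
    | none => none
    | some k => solveAltLoop (rest.drop (k + 1)) (parts ++ rest.take k ++ [c]) cs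

-- rest.replace('?', 'a') is a per-character map (exact: the pattern is a single character)
def solve_alt (s : String) (t : String) : String :=
  match solveAltLoop s.toList [] t.toList with
  | none => "NO"
  | some (parts, rest) =>
      "YES\n" ++ String.ofList (parts ++ rest.map (fun ch => if ch = '?' then 'a' else ch))

-- ===== PRECONDITION & SPEC =====
def Spec_solve (s : String) (t : String) (out : String) : Prop := out = solve_alt s t
instance (s : String) (t : String) (out : String) : Decidable (Spec_solve s t out) := by unfold Spec_solve; infer_instance

-- ===== CLAIM (what is proved, stated in full; the proofs are below) =====
def Claim_equal_solve : Prop := ∀ (s : String) (t : String), Dom_solve s t → Spec_solve s t (solve s t)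

-- ===== LEMMAS AND PROOFS =====

-- reference recursion both ports are reduced to
def go : List Char → List Char → Option (List Char)
  | ls, [] => some (ls.map fun l => if l = '?' then 'a' else l)
  | [], _ :: _ => none
  | l :: ls, c :: cs =>
    if l = '?' ∨ l = c then (go ls cs).map (c :: ·) else (go ls (c :: cs)).map (l :: ·)
termination_by ls ts => ls.length + ts.length
decreasing_by all_goals simp <;> omega

theorem solveFill_spec (letters : List Char) (i : Nat) :
    solveFill letters i =
      letters.take i ++ (letters.drop i).map (fun l => if l = '?' then 'a' else l) := by
  rw [solveFill]
  split
  · rename_i h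
    have hget : letters.getD i ' ' = letters[i]'h := by
      simp [List.getD, List.getElem?_eq_getElem h]
    rw [hget]
    by_cases hq : letters[i]'h = '?'
    · rw [if_pos hq, solveFill_spec]
      rw [List.drop_set_of_lt (by omega)]
      rw [show (letters.set i 'a').take (i + 1) = letters.take i ++ ['a'] by
        rw [List.take_add_one, List.take_set_of_le (le_refl i)]
        simp [List.getElem?_set_self', List.getElem?_eq_getElem h]]
      rw [List.drop_eq_getElem_cons h]
      simp [hq]
    · rw [if_neg hq, solveFill_spec, List.take_add_one, List.drop_eq_getElem_cons h,
        List.map_cons, List.getElem?_eq_getElem h, if_neg hq]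
      simp only [Option.toList_some, List.append_assoc, List.singleton_append]
  · rename_i h
    rw [List.drop_eq_nil_of_le (by omega), List.take_of_length_le (by omega)]
    simp
termination_by letters.length - i
decreasing_by all_goals (try simp only [List.length_set]); omega

theorem solveWhile_skip (letters : List Char) (c : Char) (index : Nat)
    (h1 : index < letters.length) (h2 : letters.getD index ' ' ≠ '?')
    (h3 : letters.getD index ' ' ≠ c) :
    solveWhile letters c index = solveWhile letters c (index + 1) := by
  rw [solveWhile]; rw [if_pos ⟨h1, h2, h3⟩]

theorem solveWhile_stop (letters : List Char) (c : Char) (index : Nat)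
    (h : ¬(index < letters.length ∧ (letters.getD index ' ' ≠ '?' ∧ letters.getD index ' ' ≠ c))) :
    solveWhile letters c index = index := by
  rw [solveWhile]; rw [if_neg h]

theorem solveLoop_skip (letters : List Char) (c : Char) (cs : List Char) (index : Nat)
    (h1 : index < letters.length) (h2 : letters.getD index ' ' ≠ '?')
    (h3 : letters.getD index ' ' ≠ c) :
    solveLoop letters index (c :: cs) = solveLoop letters (index + 1) (c :: cs) := by
  simp only [solveLoop, solveWhile_skip letters c index h1 h2 h3]

theorem solveLoop_hit (letters : List Char) (c : Char) (cs : List Char) (index : Nat)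
    (h1 : index < letters.length) (hs : solveWhile letters c index = index) :
    solveLoop letters index (c :: cs) =
      solveLoop (if letters.getD index ' ' = '?' then letters.set index c else letters)
        (index + 1) cs := by
  simp only [solveLoop, hs, if_neg (Nat.ne_of_lt h1)]

theorem solveLoop_go (ts letters : List Char) (index : Nat) (hle : index ≤ letters.length) :
    (solveLoop letters index ts).map (fun p => solveFill p.1 p.2)
      = (go (letters.drop index) ts).map (fun out => letters.take index ++ out) := by
  match ts with
  | [] => simp [solveLoop, go, solveFill_spec]
  | c :: cs =>
    by_cases hend : index = letters.length
    · have hstop : solveWhile letters c index = index :=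
        solveWhile_stop _ _ _ (by simp [hend])
      have hd : letters.drop index = [] := List.drop_eq_nil_of_le (by omega)
      simp only [solveLoop, hstop, if_pos hend, hd, go, Option.map_none]
    · have h1 : index < letters.length := by omega
      have hget : letters.getD index ' ' = letters[index]'h1 := by
        simp [List.getD, List.getElem?_eq_getElem h1]
      have hdrop : letters.drop index = letters[index]'h1 :: letters.drop (index + 1) :=
        List.drop_eq_getElem_cons h1
      by_cases hskip : letters[index]'h1 ≠ '?' ∧ letters[index]'h1 ≠ c
      · -- the while loop advances past a non-'?', non-matching character
        rw [solveLoop_skip letters c cs index h1 (by rw [hget]; exact hskip.1)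
            (by rw [hget]; exact hskip.2)]
        rw [solveLoop_go (c :: cs) letters (index + 1) (by omega)]
        rw [hdrop]
        simp only [go]
        rw [if_neg (by push_neg; exact ⟨hskip.1, hskip.2⟩)]
        cases hgo : go (letters.drop (index + 1)) (c :: cs) with
        | none => simp
        | some v =>
          simp only [Option.map_some, Option.some.injEq]
          rw [List.take_add_one, List.getElem?_eq_getElem h1]
          simp only [Option.toList_some, List.append_assoc, List.singleton_append]
      · -- the while loop stops here: match (or fill the '?')
        push_neg at hskip
        have hstop : solveWhile letters c index = index := by
          apply solveWhile_stop
          rw [hget]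
          by_cases hq : letters[index]'h1 = '?'
          · simp [hq]
          · simp [hskip hq]
        rw [solveLoop_hit letters c cs index h1 hstop]
        set letters' := if letters.getD index ' ' = '?' then letters.set index c else letters
          with hl'
        have hlen' : letters'.length = letters.length := by
          rw [hl']; split
          · exact List.length_set ..
          · rfl
        have htake' : letters'.take index = letters.take index := by
          rw [hl']; split
          · exact List.take_set_of_le (le_refl index)
          · rfl
        have hdrop' : letters'.drop (index + 1) = letters.drop (index + 1) := by
          rw [hl']; split
          · exact List.drop_set_of_lt (by omega)
          · rfl
        have htake1 : letters'.take (index + 1) = letters.take index ++ [c] := by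
          rw [List.take_add_one, htake']
          congr 1
          rw [hl']
          by_cases hq : letters.getD index ' ' = '?'
          · rw [if_pos hq]
            simp [List.getElem?_set_self', List.getElem?_eq_getElem h1]
          · rw [if_neg hq]
            rw [hget] at hq
            simp [List.getElem?_eq_getElem h1, hskip hq]
        rw [solveLoop_go cs letters' (index + 1) (by rw [hlen']; omega)]
        rw [hdrop', htake1, hdrop]
        simp only [go]
        rw [if_pos (by
          by_cases hq : letters[index]'h1 = '?'
          · exact Or.inl hq
          · exact Or.inr (hskip hq))]
        cases hgo : go (letters.drop (index + 1)) cs <;> simp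
termination_by (ts.length, letters.length - index)

-- B side: go on (rest, c :: cs) is exactly "find the first usable position, skip, consume"
theorem go_findIdx (rest : List Char) (c : Char) (cs : List Char) :
    go rest (c :: cs) =
      match rest.findIdx? (fun ch => ch == '?' || ch == c) with
      | none => none
      | some k => (go (rest.drop (k + 1)) cs).map (fun r => rest.take k ++ c :: r) := by
  induction rest with
  | nil => simp [go, List.findIdx?_nil]
  | cons l ls ih =>
    rw [List.findIdx?_cons]
    by_cases hp : l = '?' ∨ l = c
    · have : (l == '?' || l == c) = true := by
        rcases hp with h | h <;> simp [h]
      simp only [this, if_true, go, if_pos hp]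
      simp
    · have : (l == '?' || l == c) = false := by
        push_neg at hp
        simp [hp.1, hp.2]
      simp only [this, if_false, go, if_neg hp, ih]
      cases hf : ls.findIdx? (fun ch => ch == '?' || ch == c) with
      | none => simp
      | some k =>
        simp only [Option.map_some]
        cases hgo : go (ls.drop (k + 1)) cs <;> simp [hgo]

theorem solveAltLoop_go (cs rest parts : List Char) :
    (solveAltLoop rest parts cs).map
        (fun p => p.1 ++ p.2.map (fun ch => if ch = '?' then 'a' else ch))
      = (go rest cs).map (fun out => parts ++ out) := by
  induction cs generalizing rest parts with
  | nil => simp [solveAltLoop, go]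
  | cons c cs ih =>
    rw [go_findIdx]
    simp only [solveAltLoop]
    cases hf : rest.findIdx? (fun ch => ch == '?' || ch == c) with
    | none => simp
    | some k =>
      simp only [ih]
      cases hgo : go (rest.drop (k + 1)) cs <;> simp

-- ===== VERDICT (by name: the statement is the Claim_ definition above) =====
theorem solve_spec : Claim_equal_solve := by
  intro s t _
  unfold Spec_solve solve solve_alt
  have hA := solveLoop_go t.toList s.toList 0 (Nat.zero_le _)
  have hB := solveAltLoop_go t.toList s.toList []
  simp only [List.drop_zero, List.take_zero, List.nil_append] at hA hB
  cases hgo : go s.toList t.toList with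
  | none =>
    rw [hgo, Option.map_none] at hA hB
    cases hL : solveLoop s.toList 0 t.toList with
    | none =>
      cases hM : solveAltLoop s.toList [] t.toList with
      | none => rfl
      | some q => rw [hM] at hB; simp at hB
    | some p => rw [hL] at hA; simp at hA
  | some r =>
    rw [hgo, Option.map_some] at hA hB
    cases hL : solveLoop s.toList 0 t.toList with
    | none => rw [hL] at hA; simp at hA
    | some p =>
      cases hM : solveAltLoop s.toList [] t.toList with
      | none => rw [hM] at hB; simp at hB
      | some q =>
        obtain ⟨l0, i0⟩ := p
        obtain ⟨ps, rs⟩ := q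
        rw [hL] at hA
        rw [hM] at hB
        simp only [Option.map_some, Option.some.injEq, List.nil_append] at hA hB
        simp only [hA, hB]
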